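-- pv_equiv track=rewrite | github.com/Luquinharx/KingCrow | backend/scraper_ready.py | find_weekly_loot_index
-- ===== SOURCE A (Python) =====
-- def find_weekly_loot_index(headers):
--     for i, h in enumerate(headers):
--         if "weekly" in h and "loot" in h:
--             return i
--     for i, h in enumerate(headers):
--         if "weekly" in h or "loot" in h or "loots" in h:
--             return i
--     return None
-- ===== SOURCE B (Python) =====
-- def find_weekly_loot_index(headers):
--     fallback = None
--     for i, h in enumerate(headers):
--         if "weekly" in h and "loot" in h:
--             return i
--         if fallback is None and ("weekly" in h or "loot" in h):
--             fallback = i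
--     return fallback
-- ===== Notes on version B (the rewrite author's own statement) =====
-- stated objective: simpler
-- what changed: Merged A's two passes over headers into a single pass that returns immediately on a strong (weekly+loot) match and records the first weak match in a fallback variable; the redundant 'loots' test (implied by 'loot') is dropped.
import Mathlib
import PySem

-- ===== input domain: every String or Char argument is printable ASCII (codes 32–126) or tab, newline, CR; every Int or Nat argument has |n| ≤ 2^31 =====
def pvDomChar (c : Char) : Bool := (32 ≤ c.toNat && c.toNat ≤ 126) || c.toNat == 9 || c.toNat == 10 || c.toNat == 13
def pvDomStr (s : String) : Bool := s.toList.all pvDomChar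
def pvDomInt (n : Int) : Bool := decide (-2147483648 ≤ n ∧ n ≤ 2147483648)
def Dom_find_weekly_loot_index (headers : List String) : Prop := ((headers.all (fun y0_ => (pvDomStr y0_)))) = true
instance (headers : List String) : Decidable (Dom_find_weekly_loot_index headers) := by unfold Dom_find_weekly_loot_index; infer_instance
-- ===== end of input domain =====

-- B merges A's two passes into one pass with a fallback variable (objective: simpler); return values proved equal.


-- ===== PORT A =====
-- first loop: return i on the first header containing both "weekly" and "loot"
def fwlA_strong : List String → Int → Option Int
  | [], _ => none
  | h :: t, i =>
    if PySem.Str.isIn "weekly" h && PySem.Str.isIn "loot" h then some i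
    else fwlA_strong t (i + 1)

-- second loop: return i on the first header containing "weekly" or "loot" or "loots"
def fwlA_weak : List String → Int → Option Int
  | [], _ => none
  | h :: t, i =>
    if PySem.Str.isIn "weekly" h || PySem.Str.isIn "loot" h || PySem.Str.isIn "loots" h then some i
    else fwlA_weak t (i + 1)

def find_weekly_loot_index (headers : List String) : Option Int :=
  match fwlA_strong headers 0 with
  | some i => some i
  | none => fwlA_weak headers 0

-- ===== PORT B =====
-- single pass: return immediately on a strong match, record the first weak match in fallback
def fwlB_go : List String → Int → Option Int → Option Int
  | [], _, fallback => fallback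
  | h :: t, i, fallback =>
    if PySem.Str.isIn "weekly" h && PySem.Str.isIn "loot" h then some i
    else
      fwlB_go t (i + 1)
        (if fallback.isNone && (PySem.Str.isIn "weekly" h || PySem.Str.isIn "loot" h)
         then some i else fallback)

def find_weekly_loot_index_alt (headers : List String) : Option Int :=
  fwlB_go headers 0 none

-- ===== PRECONDITION & SPEC =====
def Spec_find_weekly_loot_index (headers : List String) (out : Option Int) : Prop := out = find_weekly_loot_index_alt headers
instance (headers : List String) (out : Option Int) : Decidable (Spec_find_weekly_loot_index headers out) := by unfold Spec_find_weekly_loot_index; infer_instance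

-- ===== CLAIM (what is proved, stated in full; the proofs are below) =====
def Claim_equal_find_weekly_loot_index : Prop := ∀ (headers : List String), Dom_find_weekly_loot_index headers → Spec_find_weekly_loot_index headers (find_weekly_loot_index headers)

-- ===== LEMMAS AND PROOFS =====

-- "loots" in h implies "loot" in h, so A's weak test equals B's
theorem fwl_weak_eq (h : String) :
    (PySem.Str.isIn "weekly" h || PySem.Str.isIn "loot" h || PySem.Str.isIn "loots" h)
      = (PySem.Str.isIn "weekly" h || PySem.Str.isIn "loot" h) := by
  by_cases hls : PySem.Str.isIn "loots" h = true
  · have hl : PySem.Str.isIn "loot" h = true := by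
      rw [PySem.Str.isIn_iff_infix] at hls ⊢
      exact (List.IsPrefix.isInfix (by decide)).trans hls
    rw [hl, hls, Bool.or_true, Bool.or_true]
  · rw [Bool.not_eq_true] at hls
    rw [hls, Bool.or_false]

theorem fwlB_go_eq (hs : List String) : ∀ (i : Int) (fb : Option Int),
    fwlB_go hs i fb =
      match fwlA_strong hs i with
      | some j => some j
      | none => match fb with
        | some f => some f
        | none => fwlA_weak hs i := by
  induction hs with
  | nil => intro i fb; cases fb <;> rfl
  | cons h t ih =>
    intro i fb
    rw [fwlB_go.eq_def, fwlA_strong.eq_def, fwlA_weak.eq_def]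
    simp only [fwl_weak_eq h]
    by_cases hst : (PySem.Str.isIn "weekly" h && PySem.Str.isIn "loot" h) = true
    · rw [if_pos hst, if_pos hst]
    · rw [if_neg hst, if_neg hst, ih]
      cases fb with
      | some f => rw [if_neg (by simp)]
      | none =>
        simp only [Option.isNone_none, Bool.true_and]
        by_cases hw : (PySem.Str.isIn "weekly" h || PySem.Str.isIn "loot" h) = true
        · rw [if_pos hw, if_pos hw]
        · rw [if_neg hw, if_neg hw]

-- ===== VERDICT (by name: the statement is the Claim_ definition above) =====
theorem find_weekly_loot_index_spec : Claim_equal_find_weekly_loot_index := by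
  intro headers _
  unfold Spec_find_weekly_loot_index find_weekly_loot_index find_weekly_loot_index_alt
  rw [fwlB_go_eq]
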